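-- pv_equiv track=rewrite | github.com/mathewgut/twitch-hue-bot | context_grab.py | context_match_simple
-- ===== SOURCE A (Python) =====
-- def context_match_simple(context_stack,chat):
--     match_count = []
--     chat = chat.split(" ")
--     curr_list = []
--     pos_count = 0
--     for x in context_stack:
--         counter = 0
--         context_split = x.split(" ")
--         for y in chat:
--             if y in context_split:
--                 counter += 1
--             else:
--                 pass
--         pos_count += 1
--         match_count.append([pos_count-1,counter])
--
--     for x in match_count:
--         if len(curr_list) == 0:
--             curr_list.append(x)
--         else:
--             if x[1] > curr_list[0][1]:
--                 curr_list = []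
--                 curr_list.append(x)
--             elif x[1] == curr_list[0][1]:
--                 curr_list.append(x)
--             else:
--                 pass
--
--     return curr_list
-- ===== SOURCE B (Python) =====
-- def context_match_simple(context_stack, chat):
--     # Build a frequency table of the chat words once, then score each context by
--     # walking its own (deduplicated) words and summing their chat frequencies.
--     freq = {}
--     for y in chat.split(" "):
--         freq[y] = freq.get(y, 0) + 1
--     scored = []
--     for i, ctx in enumerate(context_stack):
--         seen = set()
--         score = 0
--         for w in ctx.split(" "):
--             if w not in seen:
--                 seen.add(w)
--                 score += freq.get(w, 0)
--         scored.append([i, score])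
--     if not scored:
--         return []
--     best = max(p[1] for p in scored)
--     return [p for p in scored if p[1] == best]
-- ===== Notes on version B (the rewrite author's own statement) =====
-- stated objective: alternative
-- what changed: B inverts the counting: it builds a frequency dict of the chat words once, then scores each context by walking that context's deduplicated words (a seen-set) and summing their chat frequencies, instead of A's per-context scan of every chat word with a list-membership test; selection is max-then-filter instead of A's stateful running-max loop.
import Mathlib
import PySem

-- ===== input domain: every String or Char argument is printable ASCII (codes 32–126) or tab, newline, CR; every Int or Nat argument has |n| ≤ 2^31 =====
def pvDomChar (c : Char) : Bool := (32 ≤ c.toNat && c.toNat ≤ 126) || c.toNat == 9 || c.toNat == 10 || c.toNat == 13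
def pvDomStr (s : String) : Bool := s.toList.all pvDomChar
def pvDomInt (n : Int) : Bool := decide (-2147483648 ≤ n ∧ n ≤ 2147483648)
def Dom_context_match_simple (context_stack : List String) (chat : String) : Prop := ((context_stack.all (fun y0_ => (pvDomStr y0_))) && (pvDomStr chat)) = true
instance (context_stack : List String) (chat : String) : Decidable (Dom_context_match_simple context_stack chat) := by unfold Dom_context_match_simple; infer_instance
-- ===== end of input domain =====

-- B builds a frequency dict of the chat words once and scores each context by walking its own
-- deduplicated words (a seen-set) and summing their chat frequencies, then selects the best by
-- max-then-filter instead of A's running-max loop (objective: alternative data structure/traversal).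

-- ===== PORT A =====
-- x[1] / curr_list[0][1]: the entries are always 2-element lists, so the Python indexing never raises.
def pvSec (c : List Int) : Int := (PySem.List.pyGet? c 1).getD 0

-- the body of A's second loop (curr_list update), step for step
def pvStep (curr : List (List Int)) (x : List Int) : List (List Int) :=
  if curr.length = 0 then curr ++ [x]
  else
    let c1 := pvSec ((PySem.List.pyGet? curr 0).getD [])
    if pvSec x > c1 then [] ++ [x]
    else if pvSec x = c1 then curr ++ [x]
    else curr

def context_match_simple (context_stack : List String) (chat : String) : List (List Int) :=
  let chatw := (PySem.Str.split? chat " ").getD []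
  let st := context_stack.foldl (fun (st : List (List Int) × Int) x =>
      let context_split := (PySem.Str.split? x " ").getD []
      let counter := chatw.foldl (fun c y => if context_split.contains y then c + 1 else c) (0 : Int)
      let pos_count := st.2 + 1
      (st.1 ++ [[pos_count - 1, counter]], pos_count)) ([], 0)
  st.1.foldl pvStep []

-- ===== PORT B =====
-- max(p[1] for p in scored) over the already-guarded nonempty scored
def pvM (counts : List (List Int)) : Int :=
  (PySem.List.max? (counts.map pvSec) (fun v => v)).getD 0

def context_match_simple_alt (context_stack : List String) (chat : String) : List (List Int) :=
  let chatw := (PySem.Str.split? chat " ").getD []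
  -- freq[y] = freq.get(y, 0) + 1
  let freq := chatw.foldl (fun (d : PySem.Dict String Int) y => d.insert y (d.getD y 0 + 1)) PySem.Dict.empty
  let scored := (PySem.List.enumerate context_stack).map (fun ix =>
      -- seen = set(); score = 0; for w in ctx.split(" "): if w not in seen: add, score += freq.get(w, 0)
      let r := ((PySem.Str.split? ix.2 " ").getD []).foldl
        (fun (st : PySem.Set String × Int) w =>
          if !(PySem.Set.contains st.1 w) then (PySem.Set.add st.1 w, st.2 + freq.getD w 0)
          else st) (PySem.Set.empty, 0)
      [ix.1, r.2])
  if scored = [] then []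
  else
    let best := pvM scored
    scored.filter (fun c => pvSec c = best)

-- ===== PRECONDITION & SPEC =====
def Spec_context_match_simple (context_stack : List String) (chat : String) (out : List (List Int)) : Prop := out = context_match_simple_alt context_stack chat
instance (context_stack : List String) (chat : String) (out : List (List Int)) : Decidable (Spec_context_match_simple context_stack chat out) := by unfold Spec_context_match_simple; infer_instance

-- ===== CLAIM (what is proved, stated in full; the proofs are below) =====
def Claim_equal_context_match_simple : Prop := ∀ (context_stack : List String) (chat : String), Dom_context_match_simple context_stack chat → Spec_context_match_simple context_stack chat (context_match_simple context_stack chat)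

-- ===== LEMMAS AND PROOFS =====

-- A's first loop builds exactly the enumerate-indexed list of per-context chat-match counts
theorem pv_build_eq (chatw : List String) (l : List String)
    (acc : List (List Int)) (p : Int) :
    l.foldl (fun (st : List (List Int) × Int) x =>
      let context_split := (PySem.Str.split? x " ").getD []
      let counter := chatw.foldl (fun c y => if context_split.contains y then c + 1 else c) (0 : Int)
      let pos_count := st.2 + 1
      (st.1 ++ [[pos_count - 1, counter]], pos_count)) (acc, p)
    = (acc ++ (PySem.List.enumerate l p).map (fun ix =>
        [ix.1, ((chatw.filter (fun y => ((PySem.Str.split? ix.2 " ").getD []).contains y)).length : Int)]),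
       p + l.length) := by
  induction l generalizing acc p with
  | nil => simp [PySem.List.enumerate_nil]
  | cons x t ih =>
      simp only [List.foldl_cons]
      rw [ih, PySem.List.enumerate_cons, List.map_cons, PySem.List.foldl_if_add_one,
          List.countP_eq_length_filter]
      have h1 : p + 1 - 1 = p := by ring
      rw [h1, Prod.mk.injEq]
      refine ⟨?_, ?_⟩
      · rw [List.append_assoc, List.singleton_append]
        simp only [zero_add]
      simp only [List.length_cons]
      push_cast
      ring

-- splitting the chat-match count of w :: t off at w (w not yet seen)
theorem pv_split (chatw : List String) (t : List String) (s : PySem.Set String) (w : String)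
    (hw : PySem.Set.contains s w = false) :
    ((chatw.filter (fun y => (w :: t).contains y && !(PySem.Set.contains s y))).length : Int)
    = (chatw.count w : Int)
      + ((chatw.filter (fun y => t.contains y && !(PySem.Set.contains (PySem.Set.add s w) y))).length : Int) := by
  induction chatw with
  | nil => simp
  | cons y c ih =>
      by_cases hy : y = w
      · subst hy
        have h1 : ((y :: t).contains y && !(PySem.Set.contains s y)) = true := by
          rw [hw]; simp
        have h2 : (t.contains y && !(PySem.Set.contains (PySem.Set.add s y) y)) = false := by
          have hmem : y ∈ PySem.Set.add s y := (PySem.Set.mem_add s y y).mpr (Or.inr rfl)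
          rw [(PySem.Set.contains_iff (PySem.Set.add s y) y).mpr hmem]
          simp
        simp only [List.filter_cons, h1, h2, if_true, List.count_cons_self, List.length_cons]
        push_cast
        rw [ih]
        ring
      · have hmem : y ∈ PySem.Set.add s w ↔ y ∈ s := by
          rw [PySem.Set.mem_add s w y]
          exact ⟨fun h => h.resolve_right hy, Or.inl⟩
        have h3 : PySem.Set.contains (PySem.Set.add s w) y = PySem.Set.contains s y := by
          cases hb : PySem.Set.contains s y with
          | false =>
              have hn : y ∉ s := fun h => by
                rw [(PySem.Set.contains_iff s y).mpr h] at hb; exact absurd hb (by simp)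
              cases hc : PySem.Set.contains (PySem.Set.add s w) y with
              | false => rfl
              | true => exact absurd (hmem.mp ((PySem.Set.contains_iff _ _).mp hc)) hn
          | true =>
              exact (PySem.Set.contains_iff _ _).mpr (hmem.mpr ((PySem.Set.contains_iff s y).mp hb))
        have h4 : ((w :: t).contains y) = (t.contains y) := by
          simp [hy]
        rw [List.count_cons_of_ne hy, List.filter_cons, List.filter_cons, h3, h4]
        split_ifs with h
        · simp only [List.length_cons]
          push_cast
          rw [ih]
          ring
        · exact ih

-- B's dedup-and-lookup loop computes the chat-match count
theorem pv_count_loop (chatw : List String) (l : List String) (s : PySem.Set String) (a : Int) :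
    (l.foldl (fun (st : PySem.Set String × Int) w =>
        if !(PySem.Set.contains st.1 w) then (PySem.Set.add st.1 w, st.2 + (chatw.count w : Int))
        else st) (s, a)).2
    = a + ((chatw.filter (fun y => l.contains y && !(PySem.Set.contains s y))).length : Int) := by
  induction l generalizing s a with
  | nil => simp
  | cons w t ih =>
      simp only [List.foldl_cons]
      cases hw : PySem.Set.contains s w with
      | false =>
          simp only [Bool.not_false, if_true]
          rw [ih, pv_split chatw t s w hw]
          ring
      | true =>
          simp only [Bool.not_true, Bool.false_eq_true, if_false]
          rw [ih]
          have heq : (fun y => (w :: t).contains y && !(PySem.Set.contains s y))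
               = (fun y => t.contains y && !(PySem.Set.contains s y)) := by
            funext y
            by_cases hy : y = w
            · subst hy
              rw [hw]
              simp
            · simp [hy]
          rw [heq]

theorem pvM_append (l : List (List Int)) (x : List Int) (h : l ≠ []) :
    pvM (l ++ [x]) = max (pvM l) (pvSec x) := by
  obtain ⟨a, t, rfl⟩ := List.exists_cons_of_ne_nil h
  simp only [pvM, List.cons_append, List.map_cons, List.map_append, List.map_cons, List.map_nil,
    PySem.List.max?_id_cons, Option.getD_some, List.foldl_append, List.foldl_cons, List.foldl_nil]

theorem pvM_mem (l : List (List Int)) (h : l ≠ []) : pvM l ∈ l.map pvSec := by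
  obtain ⟨m, hm⟩ : ∃ m, PySem.List.max? (l.map pvSec) (fun v => v) = some m := by
    cases hmx : PySem.List.max? (l.map pvSec) (fun v => v) with
    | none => exact absurd (by simpa using (PySem.List.max?_eq_none_iff _ _).mp hmx) h
    | some m => exact ⟨m, rfl⟩
  simpa [pvM, hm] using PySem.List.max?_mem hm

theorem pvM_isMax (l : List (List Int)) (c : List Int) (hc : c ∈ l) : pvSec c ≤ pvM l := by
  have h : l ≠ [] := List.ne_nil_of_mem hc
  obtain ⟨m, hm⟩ : ∃ m, PySem.List.max? (l.map pvSec) (fun v => v) = some m := by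
    cases hmx : PySem.List.max? (l.map pvSec) (fun v => v) with
    | none => exact absurd (by simpa using (PySem.List.max?_eq_none_iff _ _).mp hmx) h
    | some m => exact ⟨m, rfl⟩
  have := PySem.List.max?_isMax hm (pvSec c) (List.mem_map_of_mem hc)
  simpa [pvM, hm] using this

-- the filter for the max is nonempty and its head scores the max
theorem pv_filter_ne_nil (l : List (List Int)) (h : l ≠ []) :
    l.filter (fun c => pvSec c = pvM l) ≠ [] := by
  obtain ⟨c, hc, hsec⟩ := List.mem_map.mp (pvM_mem l h)
  intro hnil
  have hmem : c ∈ l.filter (fun c => pvSec c = pvM l) :=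
    List.mem_filter.mpr ⟨hc, by rw [hsec]; simp⟩
  rw [hnil] at hmem
  simp at hmem

-- A's selection loop equals B's max-then-filter
theorem pv_sel_eq (l : List (List Int)) (h : l ≠ []) :
    l.foldl pvStep [] = l.filter (fun c => pvSec c = pvM l) := by
  induction l using List.reverseRecOn with
  | nil => exact absurd rfl h
  | append_singleton t x ih =>
    rcases eq_or_ne t [] with rfl | ht
    · simp [pvStep, pvM, PySem.List.max?_id_cons]
    · have hF := ih ht
      set F := t.filter (fun c => pvSec c = pvM t) with hFdef
      have hFne : F ≠ [] := pv_filter_ne_nil t ht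
      obtain ⟨f0, Ft, hF0⟩ := List.exists_cons_of_ne_nil hFne
      have hf0 : pvSec f0 = pvM t := by
        have : f0 ∈ F := by rw [hF0]; exact List.mem_cons_self
        have := List.mem_filter.mp (hFdef ▸ this)
        simpa using this.2
      rw [List.foldl_append, List.foldl_cons, List.foldl_nil, hF]
      rw [pvM_append t x ht]
      have hstep : pvStep F x =
          if pvSec x > pvM t then [x]
          else if pvSec x = pvM t then F ++ [x] else F := by
        rw [pvStep]
        simp only [hF0, List.length_cons, PySem.List.pyGet?_zero_cons, Option.getD_some]
        simp [hf0]
      rw [hstep, List.filter_append]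
      rcases lt_trichotomy (pvM t) (pvSec x) with hlt | heq | hgt
      · have hmax : max (pvM t) (pvSec x) = pvSec x := max_eq_right hlt.le
        rw [if_pos hlt, hmax]
        have hfe : List.filter (fun c => decide (pvSec c = pvSec x)) t = [] := by
          rw [List.filter_eq_nil_iff]
          intro c hc
          have := pvM_isMax t c hc
          simp only [decide_eq_true_eq]
          omega
        simp [hfe]
      · have hmax : max (pvM t) (pvSec x) = pvM t := by omega
        rw [if_neg (by omega : ¬ pvSec x > pvM t), if_pos heq.symm, hmax]
        simp [hFdef, heq.symm]
      · have hmax : max (pvM t) (pvSec x) = pvM t := max_eq_left hgt.le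
        rw [if_neg (by omega : ¬ pvSec x > pvM t), if_neg (by omega : ¬ pvSec x = pvM t), hmax]
        have hx : List.filter (fun c => decide (pvSec c = pvM t)) [x] = [] := by
          simp
          omega
        rw [hx, List.append_nil, hFdef]

-- ===== VERDICT (by name: the statement is the Claim_ definition above) =====
theorem context_match_simple_spec : Claim_equal_context_match_simple := by
  intro context_stack chat _
  unfold Spec_context_match_simple
  simp only [context_match_simple, context_match_simple_alt]
  rw [pv_build_eq]
  simp only [List.nil_append, PySem.Dict.foldl_insert_getD_add_one_eq_counter,
    PySem.Dict.getD_counter]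
  have hcnt : ∀ ctx : String,
      (((PySem.Str.split? ctx " ").getD []).foldl
        (fun (st : PySem.Set String × Int) w =>
          if !(PySem.Set.contains st.1 w)
          then (PySem.Set.add st.1 w, st.2 + (((PySem.Str.split? chat " ").getD []).count w : Int))
          else st) (PySem.Set.empty, 0)).2
      = ((((PySem.Str.split? chat " ").getD []).filter
          (fun y => ((PySem.Str.split? ctx " ").getD []).contains y)).length : Int) := by
    intro ctx
    rw [pv_count_loop]
    simp [PySem.Set.empty]
  simp only [hcnt]
  set counts := (PySem.List.enumerate context_stack 0).map (fun ix =>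
      [ix.1, (((((PySem.Str.split? chat " ").getD []).filter
        (fun y => ((PySem.Str.split? ix.2 " ").getD []).contains y)).length : Int))]) with hcounts
  rcases eq_or_ne counts [] with hnil | hne
  · simp [hnil]
  · rw [if_neg hne]
    exact pv_sel_eq counts hne
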